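-- pv_equiv track=rewrite | github.com/Yamapan-amigo/businesscard-automation | main.py | _deduplicate_contacts
-- ===== SOURCE A (Python) =====
-- def _deduplicate_contacts(contacts: list[dict]) -> list[dict]:
--     """Remove duplicate contacts by email, keeping the one with the most data."""
--     seen: dict[str, dict] = {}
--     for c in contacts:
--         email = c.get("email", "").strip().lower()
--         if not email:
--             continue
--         existing = seen.get(email)
--         if existing is None:
--             seen[email] = c
--         else:
--             # Keep the one with more filled fields
--             new_score = sum(1 for v in c.values() if v)
--             old_score = sum(1 for v in existing.values() if v)
--             if new_score > old_score:
--                 seen[email] = c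
--     # Also include contacts without email
--     no_email = [c for c in contacts if not c.get("email", "").strip()]
--     return list(seen.values()) + no_email
-- ===== SOURCE B (Python) =====
-- def _deduplicate_contacts(contacts: list[dict]) -> list[dict]:
--     """Dict-free rewrite: collect distinct normalized emails in first-occurrence
--     order, then for each email scan its candidates and keep the first one with
--     the maximal number of filled fields (strict-greater replacement)."""
--     def norm(c):
--         return c.get("email", "").strip().lower()
--
--     emails: list[str] = []
--     for c in contacts:
--         e = norm(c)
--         if e and e not in emails:
--             emails.append(e)
--
--     def best(e):
--         cand = [c for c in contacts if norm(c) == e]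
--         b = cand[0]
--         for c in cand[1:]:
--             if len([v for v in c.values() if v]) > len([v for v in b.values() if v]):
--                 b = c
--         return b
--
--     deduped = [best(e) for e in emails]
--     no_email = [c for c in contacts if not c.get("email", "").strip()]
--     return deduped + no_email
-- ===== Notes on version B (the rewrite author's own statement) =====
-- stated objective: alternative
-- what changed: B drops A's incrementally-updated best-so-far dict entirely: it first collects the distinct normalized emails in first-occurrence order with a membership-checked list, then for each email filters its candidates out of the input and scans them once keeping the first record with the most filled fields; it trades A's single dict pass for two dict-free staged passes.
import Mathlib
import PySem

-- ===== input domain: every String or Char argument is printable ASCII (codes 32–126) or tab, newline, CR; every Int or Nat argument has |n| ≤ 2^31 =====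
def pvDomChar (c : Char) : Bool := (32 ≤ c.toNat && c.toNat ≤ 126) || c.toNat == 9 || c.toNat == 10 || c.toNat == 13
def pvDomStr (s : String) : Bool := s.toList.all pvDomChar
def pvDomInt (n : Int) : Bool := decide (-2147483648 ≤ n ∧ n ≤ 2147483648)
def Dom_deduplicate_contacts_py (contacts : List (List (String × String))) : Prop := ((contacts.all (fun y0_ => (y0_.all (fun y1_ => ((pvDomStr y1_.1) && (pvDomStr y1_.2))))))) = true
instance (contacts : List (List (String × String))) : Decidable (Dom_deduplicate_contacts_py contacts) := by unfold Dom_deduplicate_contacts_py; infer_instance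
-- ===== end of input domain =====

-- B replaces A's single pass that maintains a best-so-far dict by a dict-free two-stage plan:
-- collect the distinct normalized emails in first-occurrence order, then pick each email's
-- fullest candidate by a per-email scan; same results, different structure (alternative).

-- ===== PORT A =====
-- c.get("email", "").strip().lower()
def pvEmailA (c : List (String × String)) : String :=
  PySem.Str.lower (PySem.Str.strip (PySem.Dict.getD ⟨c⟩ "email" ""))

-- sum(1 for v in c.values() if v)  — a 0/1-sum is a countP of the truthy values
def pvScoreA (c : List (String × String)) : Nat :=
  (PySem.Dict.values ⟨c⟩).countP (fun v => v ≠ "")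

-- one iteration of A's loop over `contacts`
def pvStepA (seen : PySem.Dict String (List (String × String))) (c : List (String × String)) :
    PySem.Dict String (List (String × String)) :=
  let email := pvEmailA c
  if email = "" then seen
  else
    match seen.get? email with
    | none => seen.insert email c
    | some existing => if pvScoreA c > pvScoreA existing then seen.insert email c else seen

def deduplicate_contacts_py (contacts : List (List (String × String))) : List (List (String × String)) :=
  let seen := contacts.foldl pvStepA PySem.Dict.empty
  let no_email := contacts.filter (fun c => PySem.Str.strip (PySem.Dict.getD ⟨c⟩ "email" "") = "")
  seen.values ++ no_email

-- ===== PORT B =====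
-- norm(c) = c.get("email", "").strip().lower()
def pvNormB (c : List (String × String)) : String :=
  PySem.Str.lower (PySem.Str.strip (PySem.Dict.getD ⟨c⟩ "email" ""))

-- len([v for v in c.values() if v])
def pvScoreB (c : List (String × String)) : Nat :=
  ((PySem.Dict.values ⟨c⟩).filter (fun v => v ≠ "")).length

-- the `emails` loop: if e and e not in emails: emails.append(e)
def pvEmails (contacts : List (List (String × String))) : List String :=
  contacts.foldl
    (fun acc c =>
      let e := pvNormB c
      if e ≠ "" ∧ ¬ e ∈ acc then acc ++ [e] else acc) []

-- cand = [c for c in contacts if norm(c) == e]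
def pvCands (contacts : List (List (String × String))) (e : String) :
    List (List (String × String)) :=
  contacts.filter (fun c => pvNormB c = e)

-- best(e): b = cand[0]; strict-greater replacement over cand[1:]
-- (cand is never empty for e ∈ emails, so the [] branch — Python's IndexError — is unreachable)
def pvBest (contacts : List (List (String × String))) (e : String) : List (String × String) :=
  match pvCands contacts e with
  | [] => []
  | b :: rest => rest.foldl (fun b c => if pvScoreB c > pvScoreB b then c else b) b

def deduplicate_contacts_py_alt (contacts : List (List (String × String))) : List (List (String × String)) :=
  let deduped := (pvEmails contacts).map (pvBest contacts)
  let no_email := contacts.filter (fun c => PySem.Str.strip (PySem.Dict.getD ⟨c⟩ "email" "") = "")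
  deduped ++ no_email

-- ===== PRECONDITION & SPEC =====
def Spec_deduplicate_contacts_py (contacts : List (List (String × String))) (out : List (List (String × String))) : Prop := out = deduplicate_contacts_py_alt contacts
instance (contacts : List (List (String × String))) (out : List (List (String × String))) : Decidable (Spec_deduplicate_contacts_py contacts out) := by unfold Spec_deduplicate_contacts_py; infer_instance

-- ===== CLAIM (what is proved, stated in full; the proofs are below) =====
def Claim_equal_deduplicate_contacts_py : Prop := ∀ (contacts : List (List (String × String))), Dom_deduplicate_contacts_py contacts → Spec_deduplicate_contacts_py contacts (deduplicate_contacts_py contacts)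

-- ===== LEMMAS AND PROOFS =====

-- the two ports' normalizations coincide definitionally; the two scores by countP = filter-length
theorem pv_email_eq (c : List (String × String)) : pvEmailA c = pvNormB c := rfl

theorem pv_score_eq (c : List (String × String)) : pvScoreA c = pvScoreB c := by
  simp [pvScoreA, pvScoreB, List.countP_eq_length_filter]

-- A's step, case by case, in B's vocabulary
theorem pvStepA_skip (seen : PySem.Dict String (List (String × String)))
    (c : List (String × String)) (h : pvNormB c = "") : pvStepA seen c = seen := by
  simp only [pvStepA]
  rw [pv_email_eq, h]
  simp

theorem pvStepA_new (seen : PySem.Dict String (List (String × String)))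
    (c : List (String × String)) (h : pvNormB c ≠ "")
    (hg : seen.get? (pvNormB c) = none) : pvStepA seen c = seen.insert (pvNormB c) c := by
  simp only [pvStepA]
  rw [pv_email_eq, if_neg h, hg]

theorem pvStepA_old (seen : PySem.Dict String (List (String × String)))
    (c : List (String × String)) (ex : List (String × String)) (h : pvNormB c ≠ "")
    (hg : seen.get? (pvNormB c) = some ex) :
    pvStepA seen c = if pvScoreB c > pvScoreB ex then seen.insert (pvNormB c) c else seen := by
  simp only [pvStepA]
  rw [pv_email_eq, if_neg h, hg]
  simp [pv_score_eq]

-- appending one contact to pvEmails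
theorem pv_emails_append (cs : List (List (String × String))) (c : List (String × String)) :
    pvEmails (cs ++ [c]) =
      if pvNormB c ≠ "" ∧ ¬ pvNormB c ∈ pvEmails cs
      then pvEmails cs ++ [pvNormB c] else pvEmails cs := by
  simp [pvEmails, List.foldl_append]

-- appending one contact to the candidate list of an email
theorem pv_cands_append (cs : List (List (String × String))) (c : List (String × String))
    (e : String) :
    pvCands (cs ++ [c]) e = pvCands cs e ++ (if pvNormB c = e then [c] else []) := by
  by_cases h : pvNormB c = e <;>
    simp [pvCands, List.filter_append, h]

-- membership in pvEmails = some contact has that (nonempty) normalized email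
theorem pv_mem_emails (cs : List (List (String × String))) (e : String) :
    e ∈ pvEmails cs ↔ e ≠ "" ∧ pvCands cs e ≠ [] := by
  induction cs using List.reverseRecOn with
  | nil => simp [pvEmails, pvCands]
  | append_singleton cs c ih =>
      rw [pv_emails_append, pv_cands_append]
      by_cases hce : pvNormB c = e
      · subst hce
        by_cases hemp : pvNormB c = ""
        · rw [if_neg (by simp [hemp])]
          constructor
          · intro hmm
            exact absurd hemp (ih.mp hmm).1
          · rintro ⟨he, -⟩
            exact absurd hemp he
        · by_cases hmem : pvNormB c ∈ pvEmails cs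
          · rw [if_neg (by simp [hmem])]
            have hne := (ih.mp hmem).2
            refine ⟨fun _ => ⟨hemp, by simp [hne]⟩, fun _ => hmem⟩
          · rw [if_pos ⟨hemp, hmem⟩]
            simp [hemp]
      · have h1 : (if pvNormB c ≠ "" ∧ ¬ pvNormB c ∈ pvEmails cs
            then pvEmails cs ++ [pvNormB c] else pvEmails cs) =
            pvEmails cs ++ (if pvNormB c ≠ "" ∧ ¬ pvNormB c ∈ pvEmails cs
              then [pvNormB c] else []) := by
          split <;> simp
        rw [h1]
        simp only [List.mem_append, ih]
        constructor
        · rintro (h | h)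
          · exact ⟨h.1, by simp [h.2]⟩
          · split at h <;> simp at h
            exact absurd h.symm hce
        · rintro ⟨he, hc⟩
          left
          refine ⟨he, ?_⟩
          simpa [hce] using hc

-- pvBest after appending a contact with a DIFFERENT normalized email
theorem pv_best_append_ne (cs : List (List (String × String))) (c : List (String × String))
    (e : String) (h : pvNormB c ≠ e) : pvBest (cs ++ [c]) e = pvBest cs e := by
  simp [pvBest, pv_cands_append, h]

-- pvBest after appending a contact with email e, when e already occurs
theorem pv_best_append_eq (cs : List (List (String × String))) (c : List (String × String))
    (e : String) (h : pvNormB c = e) (hne : pvCands cs e ≠ []) :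
    pvBest (cs ++ [c]) e =
      if pvScoreB c > pvScoreB (pvBest cs e) then c else pvBest cs e := by
  obtain ⟨b, rest, hb⟩ := List.exists_cons_of_ne_nil hne
  have h2 : pvCands (cs ++ [c]) e = b :: (rest ++ [c]) := by
    rw [pv_cands_append, hb, if_pos h]; rfl
  simp [pvBest, h2, hb, List.foldl_append]

-- pvBest after appending the FIRST contact with email e
theorem pv_best_append_first (cs : List (List (String × String))) (c : List (String × String))
    (e : String) (h : pvNormB c = e) (hnil : pvCands cs e = []) :
    pvBest (cs ++ [c]) e = c := by
  have h2 : pvCands (cs ++ [c]) e = [c] := by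
    rw [pv_cands_append, hnil, if_pos h]; rfl
  simp [pvBest, h2]

-- find? over the simulated items list
theorem pv_find_map (l : List String) (f : String → List (String × String)) (e : String) :
    ((l.map (fun k => (k, f k))).find? (fun p => p.1 == e)).map Prod.snd
      = if e ∈ l then some (f e) else none := by
  induction l with
  | nil => simp
  | cons a t ih =>
      by_cases ha : a = e
      · subst ha
        rw [List.map_cons, List.find?_cons_of_pos (by simp)]
        simp
      · rw [List.map_cons, List.find?_cons_of_neg (by simpa using ha), ih]
        simp [Ne.symm ha]

-- MAIN INVARIANT: A's dict after the whole loop is B's (email, best) table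
set_option maxHeartbeats 1000000 in
theorem pv_fold (cs : List (List (String × String))) :
    (cs.foldl pvStepA PySem.Dict.empty).items
      = (pvEmails cs).map (fun e => (e, pvBest cs e)) := by
  induction cs using List.reverseRecOn with
  | nil => simp [pvEmails, PySem.Dict.empty]
  | append_singleton cs c ih =>
      rw [List.foldl_append, List.foldl_cons, List.foldl_nil, pv_emails_append]
      set seen := cs.foldl pvStepA PySem.Dict.empty with hseen
      clear_value seen
      have hget : ∀ e : String,
          seen.get? e = if e ∈ pvEmails cs then some (pvBest cs e) else none := by
        intro e
        rw [PySem.Dict.get?, ih, pv_find_map]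
      have hcontains : ∀ e : String, seen.contains e = decide (e ∈ pvEmails cs) := by
        intro e
        rw [PySem.Dict.contains_eq_isSome_get?, hget]
        by_cases he : e ∈ pvEmails cs <;> simp [he]
      by_cases hemp : pvNormB c = ""
      · -- skipped contact: nothing changes on either side
        rw [pvStepA_skip seen c hemp, if_neg (by simp [hemp]), ih]
        apply List.map_congr_left
        intro e he
        have hene : e ≠ "" := ((pv_mem_emails cs e).mp he).1
        rw [pv_best_append_ne cs c e (by rw [hemp]; exact Ne.symm hene)]
      · by_cases hmem : pvNormB c ∈ pvEmails cs
        · -- existing email: possible in-place replacement on both sides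
          rw [if_neg (by simp [hmem])]
          have hcand := ((pv_mem_emails cs (pvNormB c)).mp hmem).2
          have hg : seen.get? (pvNormB c) = some (pvBest cs (pvNormB c)) := by
            rw [hget]; simp [hmem]
          rw [pvStepA_old seen c _ hemp hg]
          have hc' : seen.contains (pvNormB c) = true := by
            rw [hcontains]; simp [hmem]
          by_cases hsc : pvScoreB c > pvScoreB (pvBest cs (pvNormB c))
          · rw [if_pos hsc]
            have hins : (seen.insert (pvNormB c) c).items
                = seen.items.map (fun p => if p.1 == pvNormB c then (pvNormB c, c) else p) := by
              simp [PySem.Dict.insert, hc']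
            rw [hins, ih, List.map_map]
            apply List.map_congr_left
            intro e he
            by_cases hee : e = pvNormB c
            · simp [Function.comp, hee, pv_best_append_eq cs c (pvNormB c) rfl hcand, hsc]
            · simp [Function.comp, hee, pv_best_append_ne cs c e (fun h => hee h.symm)]
          · rw [if_neg hsc, ih]
            apply List.map_congr_left
            intro e he
            by_cases hee : e = pvNormB c
            · simp [hee, pv_best_append_eq cs c (pvNormB c) rfl hcand, hsc]
            · rw [pv_best_append_ne cs c e (fun h => hee h.symm)]
        · -- new email: appended at the end on both sides
          rw [if_pos ⟨hemp, hmem⟩]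
          have hcand : pvCands cs (pvNormB c) = [] := by
            by_contra hne
            exact hmem ((pv_mem_emails cs (pvNormB c)).mpr ⟨hemp, hne⟩)
          have hg : seen.get? (pvNormB c) = none := by rw [hget]; simp [hmem]
          rw [pvStepA_new seen c hemp hg]
          have hc' : seen.contains (pvNormB c) = false := by
            rw [hcontains]; simp [hmem]
          have hins : (seen.insert (pvNormB c) c).items = seen.items ++ [(pvNormB c, c)] := by
            simp [PySem.Dict.insert, hc']
          rw [hins, ih, List.map_append]
          congr 1
          · apply List.map_congr_left
            intro e he
            rw [pv_best_append_ne cs c e (fun h => hmem (h ▸ he))]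
          · simp [pv_best_append_first cs c (pvNormB c) rfl hcand]

-- ===== VERDICT (by name: the statement is the Claim_ definition above) =====
theorem deduplicate_contacts_py_spec : Claim_equal_deduplicate_contacts_py := by
  unfold Claim_equal_deduplicate_contacts_py
  intro contacts _
  unfold Spec_deduplicate_contacts_py deduplicate_contacts_py deduplicate_contacts_py_alt
  simp only [PySem.Dict.values, pv_fold, List.map_map]
  rfl
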